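-- pv_equiv track=rewrite | github.com/AnonChaisrithong/AnonChaisrithong | project/09 34 เติมเลข.py | pattern4
-- ===== SOURCE A (Python) =====
-- def pattern4(N):
--     l1 = []
--     for i in range(N):
--         c = i + 1
--         l2 = []
--         for k in range(i):
--             l2.append(0)
--         for k in range(N - i):
--             l2.append(c)
--             c += k + 2 + i
--         l1.append(l2)
--     return l1
-- ===== SOURCE B (Python) =====
-- def pattern4(N):
--     return [[0] * i + [(i + 1) + j * (j - 1) // 2 + j * (2 + i) for j in range(N - i)]
--             for i in range(N)]
-- ===== Notes on version B (the rewrite author's own statement) =====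
-- stated objective: simpler
-- what changed: Replaces the stepwise accumulator c (incremented by k+2+i each iteration) with a per-cell closed form (i+1)+j*(j-1)//2+j*(2+i), expressed as a nested comprehension with no cross-iteration state.
import Mathlib
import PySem

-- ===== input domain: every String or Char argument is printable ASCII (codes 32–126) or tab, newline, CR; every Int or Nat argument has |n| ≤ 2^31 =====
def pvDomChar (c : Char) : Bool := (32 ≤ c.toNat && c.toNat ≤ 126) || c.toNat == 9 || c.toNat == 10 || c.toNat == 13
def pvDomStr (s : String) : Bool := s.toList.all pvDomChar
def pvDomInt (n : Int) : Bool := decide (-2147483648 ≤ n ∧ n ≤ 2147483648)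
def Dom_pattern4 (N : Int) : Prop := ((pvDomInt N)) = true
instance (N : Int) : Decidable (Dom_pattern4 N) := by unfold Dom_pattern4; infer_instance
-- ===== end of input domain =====

-- B replaces A's running accumulator c with a per-cell closed form; same cost, simpler (objective: simpler).

-- ===== PORT A =====
def pattern4 (N : Int) : List (List Int) :=
  (PySem.List.pyRange 0 N 1).foldl (fun l1 i =>
    let c : Int := i + 1
    let l2 : List Int := []
    let l2 := (PySem.List.pyRange 0 i 1).foldl (fun l2 _k => l2 ++ [(0 : Int)]) l2
    let p := (PySem.List.pyRange 0 (N - i) 1).foldl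
      (fun (p : List Int × Int) k => (p.1 ++ [p.2], p.2 + (k + 2 + i))) (l2, c)
    l1 ++ [p.1]) []

-- ===== PORT B =====
def pattern4_alt (N : Int) : List (List Int) :=
  (PySem.List.pyRange 0 N 1).map (fun i =>
    List.replicate i.toNat 0 ++
    (PySem.List.pyRange 0 (N - i) 1).map (fun j =>
      (i + 1) + PySem.Int.floordiv (j * (j - 1)) 2 + j * (2 + i)))

-- ===== PRECONDITION & SPEC =====
def Spec_pattern4 (N : Int) (out : List (List Int)) : Prop := out = pattern4_alt N
instance (N : Int) (out : List (List Int)) : Decidable (Spec_pattern4 N out) := by unfold Spec_pattern4; infer_instance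

-- ===== CLAIM (what is proved, stated in full; the proofs are below) =====
def Claim_equal_pattern4 : Prop := ∀ (N : Int), Dom_pattern4 N → Spec_pattern4 N (pattern4 N)

-- ===== LEMMAS AND PROOFS =====

-- floordiv by 2 shifts by added multiples of 2
lemma fd_step (x n : Int) : PySem.Int.floordiv (x + 2 * n) 2 = PySem.Int.floordiv x 2 + n := by
  simp only [PySem.Int.floordiv]
  rw [Int.fdiv_eq_ediv, Int.fdiv_eq_ediv]
  omega

-- inner loop of A, over range(0, n), equals B's closed-form map
lemma inner_loop (i : Int) (n : ℕ) (acc : List Int) :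
    (PySem.List.pyRange 0 (n : Int) 1).foldl
      (fun (p : List Int × Int) k => (p.1 ++ [p.2], p.2 + (k + 2 + i))) (acc, i + 1)
    = (acc ++ (PySem.List.pyRange 0 (n : Int) 1).map (fun j =>
        (i + 1) + PySem.Int.floordiv (j * (j - 1)) 2 + j * (2 + i)),
       (i + 1) + PySem.Int.floordiv ((n : Int) * ((n : Int) - 1)) 2 + (n : Int) * (2 + i)) := by
  induction n with
  | zero => simp [PySem.List.pyRange_one_eq_nil (by norm_num : (0:Int) ≤ 0), PySem.Int.floordiv]
  | succ m ih =>
      have h : ((m + 1 : ℕ) : Int) = (m : Int) + 1 := by push_cast; ring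
      rw [h, PySem.List.pyRange_one_succ_right (by exact_mod_cast Int.natCast_nonneg m),
          List.foldl_append, List.map_append, ih]
      simp only [List.foldl_cons, List.foldl_nil, List.map_cons, List.map_nil, List.append_assoc,
        Prod.mk.injEq]
      refine ⟨trivial, ?_⟩
      have e : PySem.Int.floordiv (((m : Int) + 1) * (((m : Int) + 1) - 1)) 2
          = PySem.Int.floordiv ((m : Int) * ((m : Int) - 1)) 2 + (m : Int) := by
        rw [show ((m:Int)+1) * (((m:Int)+1) - 1) = (m:Int) * ((m:Int) - 1) + 2 * (m:Int) by ring,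
            fd_step]
      rw [e]; ring

-- one row of A equals one row of B, for 0 ≤ i
lemma row_eq (N i : Int) (hi : 0 ≤ i) :
    (let c : Int := i + 1
     let l2 : List Int := []
     let l2 := (PySem.List.pyRange 0 i 1).foldl (fun l2 _k => l2 ++ [(0 : Int)]) l2
     let p := (PySem.List.pyRange 0 (N - i) 1).foldl
       (fun (p : List Int × Int) k => (p.1 ++ [p.2], p.2 + (k + 2 + i))) (l2, c)
     p.1)
    = List.replicate i.toNat 0 ++
      (PySem.List.pyRange 0 (N - i) 1).map (fun j =>
        (i + 1) + PySem.Int.floordiv (j * (j - 1)) 2 + j * (2 + i)) := by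
  have hz : (PySem.List.pyRange 0 i 1).foldl (fun l2 _k => l2 ++ [(0 : Int)]) []
      = List.replicate i.toNat 0 := by
    rw [PySem.List.foldl_append_singleton_eq_map (f := fun _ => (0 : Int))]
    simp [List.map_const', PySem.List.length_pyRange_one]
  by_cases hN : N - i ≤ 0
  · simp [hz, PySem.List.pyRange_one_eq_nil hN]
  · push Not at hN
    obtain ⟨n, hn⟩ : ∃ n : ℕ, N - i = (n : Int) := ⟨(N - i).toNat, (Int.toNat_of_nonneg hN.le).symm⟩
    simp only [hz, hn, inner_loop i n (List.replicate i.toNat 0)]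

-- ===== VERDICT (by name: the statement is the Claim_ definition above) =====
theorem pattern4_spec : Claim_equal_pattern4 := by
  intro N _
  show pattern4 N = pattern4_alt N
  unfold pattern4 pattern4_alt
  have h1 := PySem.List.foldl_congr_mem
    (l := PySem.List.pyRange 0 N 1) (init := ([] : List (List Int)))
    (f := fun (l1 : List (List Int)) i =>
      let c : Int := i + 1
      let l2 : List Int := []
      let l2 := (PySem.List.pyRange 0 i 1).foldl (fun l2 _k => l2 ++ [(0 : Int)]) l2
      let p := (PySem.List.pyRange 0 (N - i) 1).foldl
        (fun (p : List Int × Int) k => (p.1 ++ [p.2], p.2 + (k + 2 + i))) (l2, c)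
      l1 ++ [p.1])
    (g := fun (l1 : List (List Int)) i => l1 ++ [List.replicate i.toNat 0 ++
      (PySem.List.pyRange 0 (N - i) 1).map (fun j =>
        (i + 1) + PySem.Int.floordiv (j * (j - 1)) 2 + j * (2 + i))])
    (by
      intro acc i hi
      have h0 : 0 ≤ i := ((PySem.List.mem_pyRange_one).1 hi).1
      simpa using congrArg (fun r => acc ++ [r]) (row_eq N i h0))
  rw [h1, PySem.List.foldl_append_singleton_eq_map]
  simp
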